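-- pv_equiv track=rewrite | github.com/sansr/bioinformatics-course | biology-meets-programming/week4.py | compute_col_det
-- ===== SOURCE A (Python) =====
-- def compute_col_det(motifs):
--     dets = []
--     columns = [''.join(seq) for seq in zip(*motifs)]
--     for nucleotide in 'ACGT':
--         det = 0
--         for c in columns:
--             det += c.count(nucleotide)
--         dets.append(det)
--
--     return dets
-- ===== SOURCE B (Python) =====
-- def compute_col_det(motifs):
--     counts = {}
--     for col in zip(*motifs):
--         for ch in col:
--             counts[ch] = counts.get(ch, 0) + 1
--     return [counts.get(n, 0) for n in 'ACGT']
-- ===== Notes on version B (the rewrite author's own statement) =====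
-- stated objective: simpler
-- what changed: B builds one character-frequency dict in a single pass over the zip(*motifs) columns and reads the four nucleotide counts out of it, instead of A's outer loop over 'ACGT' that rescans every column with .count four times.
import Mathlib
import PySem

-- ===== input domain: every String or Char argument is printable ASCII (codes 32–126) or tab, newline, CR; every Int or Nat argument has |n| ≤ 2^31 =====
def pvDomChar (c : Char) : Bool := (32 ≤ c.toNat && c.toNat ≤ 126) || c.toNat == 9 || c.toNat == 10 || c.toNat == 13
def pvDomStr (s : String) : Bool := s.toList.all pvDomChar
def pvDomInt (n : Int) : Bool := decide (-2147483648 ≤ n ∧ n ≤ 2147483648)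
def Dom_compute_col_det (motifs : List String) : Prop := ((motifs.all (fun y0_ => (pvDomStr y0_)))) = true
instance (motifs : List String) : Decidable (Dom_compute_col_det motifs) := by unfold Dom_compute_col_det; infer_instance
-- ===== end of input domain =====

-- B builds one frequency dict in a single pass over the columns instead of four .count scans; return value only.

-- zip(*motifs): columns truncated to the shortest motif (exact port of the zip builtin)
def pyZipCols (ls : List (List Char)) : List (List Char) :=
  (List.range ((ls.map List.length).min?.getD 0)).map (fun i => ls.map (fun l => l.getD i ' '))

-- ===== PORT A =====
def compute_col_det (motifs : List String) : List Int :=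
  let columns := pyZipCols (motifs.map String.toList)
  "ACGT".toList.foldl
    (fun dets nucleotide =>
      dets ++ [columns.foldl (fun det c => det + (PySem.Chars.count c [nucleotide] : Int)) 0])
    []

-- ===== PORT B =====
def compute_col_det_alt (motifs : List String) : List Int :=
  let counts :=
    (pyZipCols (motifs.map String.toList)).foldl
      (fun d col => col.foldl (fun d ch => d.insert ch (d.getD ch 0 + 1)) d)
      PySem.Dict.empty
  "ACGT".toList.map (fun n => counts.getD n 0)

-- ===== PRECONDITION & SPEC =====
def Spec_compute_col_det (motifs : List String) (out : List Int) : Prop := out = compute_col_det_alt motifs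
instance (motifs : List String) (out : List Int) : Decidable (Spec_compute_col_det motifs out) := by unfold Spec_compute_col_det; infer_instance

-- ===== CLAIM (what is proved, stated in full; the proofs are below) =====
def Claim_equal_compute_col_det : Prop := ∀ (motifs : List String), Dom_compute_col_det motifs → Spec_compute_col_det motifs (compute_col_det motifs)

-- ===== LEMMAS AND PROOFS =====

-- str.count with a single-character needle counts occurrences of that character
theorem chars_count_go_singleton (n : Char) (l : List Char) (fuel acc : Nat)
    (h : l.length ≤ fuel) :
    PySem.Chars.count.go [n] fuel l acc = acc + l.count n := by
  induction l generalizing fuel acc with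
  | nil => cases fuel <;> simp [PySem.Chars.count.go]
  | cons hd tl ih =>
    cases fuel with
    | zero => simp at h
    | succ f =>
      simp only [PySem.Chars.count.go, List.isPrefixOf]
      by_cases hn : n = hd
      · subst hn
        simp only [beq_self_eq_true, Bool.and_true, if_true, List.length_cons,
          List.length_nil, List.drop_succ_cons, List.drop_zero]
        rw [ih f (acc + 1) (by simpa using h)]
        simp
        omega
      · rw [if_neg (by simp [hn])]
        rw [ih f acc (by simpa using h)]
        simp [Ne.symm hn]

theorem chars_count_singleton (c : List Char) (n : Char) :
    PySem.Chars.count c [n] = c.count n := by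
  simp [PySem.Chars.count, chars_count_go_singleton n c c.length 0 le_rfl]

theorem a_inner (cols : List (List Char)) (n : Char) :
    cols.foldl (fun det c => det + (PySem.Chars.count c [n] : Int)) 0
      = (cols.flatten.count n : Int) := by
  induction cols using List.reverseRecOn with
  | nil => simp
  | append_singleton xs x ih =>
    simp only [List.foldl_append, List.foldl_cons, List.foldl_nil, ih]
    simp [chars_count_singleton, List.count_append]

theorem b_inner (cols : List (List Char)) (n : Char) :
    (cols.foldl (fun d col => col.foldl (fun d ch => d.insert ch (d.getD ch 0 + 1)) d)
      (PySem.Dict.empty : PySem.Dict Char Int)).getD n 0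
      = (cols.flatten.count n : Int) := by
  rw [← List.foldl_flatten]
  rw [PySem.Dict.getD_foldl_insert_add_one]
  simp [PySem.Dict.empty, PySem.Dict.getD, PySem.Dict.get?]

-- ===== VERDICT (by name: the statement is the Claim_ definition above) =====
theorem compute_col_det_spec : Claim_equal_compute_col_det := by
  intro motifs _
  unfold Spec_compute_col_det compute_col_det compute_col_det_alt
  rw [PySem.List.foldl_append_singleton_eq_map]
  apply List.map_congr_left
  intro n _
  rw [a_inner, b_inner]
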